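-- pv_equiv track=rewrite | github.com/eliottcassidy2000/math | 04-computation/nonham_vanish_n9.py | check_nonham
-- ===== SOURCE A (Python) =====
-- from itertools import permutations
--
-- def E_paths(T, verts, a):
--     """Count Ham paths in T[verts] ending at a."""
--     verts = list(verts)
--     if len(verts) == 1:
--         return 1 if verts[0] == a else 0
--     count = 0
--     for p in permutations(verts):
--         if p[-1] != a: continue
--         valid = True
--         for k in range(len(p)-1):
--             if T.get((p[k], p[k+1]), 0) != 1:
--                 valid = False
--                 break
--         if valid:
--             count += 1
--     return count
--
-- def B_paths(T, verts, b):
--     """Count Ham paths in T[verts] starting at b."""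
--     verts = list(verts)
--     if len(verts) == 1:
--         return 1 if verts[0] == b else 0
--     count = 0
--     for p in permutations(verts):
--         if p[0] != b: continue
--         valid = True
--         for k in range(len(p)-1):
--             if T.get((p[k], p[k+1]), 0) != 1:
--                 valid = False
--                 break
--         if valid:
--             count += 1
--     return count
--
-- def check_nonham(T, n, a, b):
--     """Check NONHAM(a,b) = M[a,b] when T[a,b]=0."""
--     U = [v for v in range(n) if v != a and v != b]
--     total = 0
--
--     for mask in range(1 << len(U)):
--         S_list = [U[k] for k in range(len(U)) if mask & (1 << k)]
--         R = [U[k] for k in range(len(U)) if not (mask & (1 << k))]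
--         sign = (-1)**len(S_list)
--         S_set = sorted(set(S_list) | {a})
--         R_set = sorted(set(R) | {b})
--
--         ea = E_paths(T, S_set, a)
--         bb = B_paths(T, R_set, b)
--
--         total += sign * ea * bb
--
--     return total
-- ===== SOURCE B (Python) =====
-- def check_nonham(T, n, a, b):
--     """Check NONHAM(a,b) = M[a,b] when T[a,b]=0."""
--     U = [v for v in range(n) if v != a and v != b]
--
--     def ends_at(v, rest, t):
--         # number of Hamiltonian chains v -> ... covering rest whose final vertex is t
--         if not rest:
--             return 1 if v == t else 0
--         return sum(ends_at(u, [w for w in rest if w != u], t)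
--                    for u in rest if T.get((v, u), 0) == 1)
--
--     def starts_from(v, rest):
--         # number of Hamiltonian chains v -> ... covering rest
--         if not rest:
--             return 1
--         return sum(starts_from(u, [w for w in rest if w != u])
--                    for u in rest if T.get((v, u), 0) == 1)
--
--     total = 0
--     for mask in range(1 << len(U)):
--         S = [U[k] for k in range(len(U)) if mask & (1 << k)]
--         R = [U[k] for k in range(len(U)) if not (mask & (1 << k))]
--         pts = S + [a]
--         ea = sum(ends_at(s, [w for w in pts if w != s], a) for s in pts)
--         bb = starts_from(b, R)
--         total += (-1) ** len(S) * ea * bb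
--     return total
-- ===== Notes on version B (the rewrite author's own statement) =====
-- stated objective: alternative
-- what changed: Per subset, A enumerates every permutation of the vertex set and filters; B counts Hamiltonian chains by recursive depth-first extension that only follows existing edges, so no permutation list, vertex-set sorting or set-building is used.
import Mathlib
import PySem

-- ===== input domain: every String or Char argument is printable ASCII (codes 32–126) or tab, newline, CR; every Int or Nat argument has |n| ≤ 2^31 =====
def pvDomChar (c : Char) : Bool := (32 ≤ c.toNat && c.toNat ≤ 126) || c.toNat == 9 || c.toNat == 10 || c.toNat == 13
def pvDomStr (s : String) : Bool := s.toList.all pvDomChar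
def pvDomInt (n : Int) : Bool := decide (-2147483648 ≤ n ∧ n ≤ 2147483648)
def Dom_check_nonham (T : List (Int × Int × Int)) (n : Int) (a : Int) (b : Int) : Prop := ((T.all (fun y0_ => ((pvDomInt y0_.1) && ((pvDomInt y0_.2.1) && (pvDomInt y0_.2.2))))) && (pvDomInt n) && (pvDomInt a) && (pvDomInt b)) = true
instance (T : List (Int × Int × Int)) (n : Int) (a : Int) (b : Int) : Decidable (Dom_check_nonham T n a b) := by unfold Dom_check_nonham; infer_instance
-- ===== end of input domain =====

/- B replaces A's per-subset filter-all-permutations counting with a recursive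
   depth-first chain extension that only follows existing edges (objective: alternative). -/

-- ===== PORT A =====
-- T.get((u, v), 0) on the dict whose items are T
def aget (T : List (Int × Int × Int)) (u v : Int) : Int :=
  PySem.Dict.getD (PySem.Dict.ofList (T.map (fun t => ((t.1, t.2.1), t.2.2)))) (u, v) 0

-- literal port of E_paths; the Python inner loop's `break` only skips re-setting
-- `valid` to False, so the break-free fold below computes the same flag
def E_paths (T : List (Int × Int × Int)) (verts : List Int) (a : Int) : Int :=
  if verts.length = 1 then (if PySem.List.pyGetD verts 0 0 = a then 1 else 0)
  else
    (PySem.List.permutations verts verts.length).foldl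
      (fun count p =>
        if PySem.List.pyGetD p (-1) 0 ≠ a then count
        else
          let valid := (PySem.List.pyRange 0 ((p.length : Int) - 1) 1).foldl
            (fun valid k =>
              if aget T (PySem.List.pyGetD p k 0) (PySem.List.pyGetD p (k + 1) 0) ≠ 1 then false
              else valid) true
          if valid then count + 1 else count) 0

-- literal port of B_paths (same remark about `break`)
def B_paths (T : List (Int × Int × Int)) (verts : List Int) (b : Int) : Int :=
  if verts.length = 1 then (if PySem.List.pyGetD verts 0 0 = b then 1 else 0)
  else
    (PySem.List.permutations verts verts.length).foldl
      (fun count p =>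
        if PySem.List.pyGetD p 0 0 ≠ b then count
        else
          let valid := (PySem.List.pyRange 0 ((p.length : Int) - 1) 1).foldl
            (fun valid k =>
              if aget T (PySem.List.pyGetD p k 0) (PySem.List.pyGetD p (k + 1) 0) ≠ 1 then false
              else valid) true
          if valid then count + 1 else count) 0

def check_nonham (T : List (Int × Int × Int)) (n : Int) (a : Int) (b : Int) : Int :=
  let U := (PySem.List.pyRange 0 n 1).filter (fun v => decide (v ≠ a) && decide (v ≠ b))
  (PySem.List.pyRange 0 (2 ^ U.length) 1).foldl
    (fun total mask =>
      -- mask & (1 << k): k comes from range(len(U)), so k ≥ 0 and 1 << k = 2 ^ k.toNat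
      let S_list := ((PySem.List.pyRange 0 (U.length : Int) 1).filter
          (fun k => decide (PySem.Int.band mask (2 ^ k.toNat) ≠ 0))).map
          (fun k => PySem.List.pyGetD U k 0)
      let R := ((PySem.List.pyRange 0 (U.length : Int) 1).filter
          (fun k => decide (PySem.Int.band mask (2 ^ k.toNat) = 0))).map
          (fun k => PySem.List.pyGetD U k 0)
      let sign : Int := (-1) ^ S_list.length
      let S_set := PySem.List.sorted (PySem.Set.union (PySem.Set.ofList S_list) [a]) (fun x => x) false
      let R_set := PySem.List.sorted (PySem.Set.union (PySem.Set.ofList R) [b]) (fun x => x) false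
      total + sign * E_paths T S_set a * B_paths T R_set b) 0

-- ===== PORT B =====
-- T.get((u, v), 0) on the dict whose items are T
def bget (T : List (Int × Int × Int)) (u v : Int) : Int :=
  PySem.Dict.getD (PySem.Dict.ofList (T.map (fun t => ((t.1, t.2.1), t.2.2)))) (u, v) 0

theorem pv_len_filter_ne_lt (l : List Int) (u : Int) (hu : u ∈ l) :
    (l.filter (fun w => decide (w ≠ u))).length < l.length := by
  induction l with
  | nil => cases hu
  | cons x xs ih =>
    by_cases hx : x = u
    · subst hx
      have := List.length_filter_le (fun w => decide (w ≠ x)) xs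
      simp at this ⊢
      omega
    · rcases List.mem_cons.mp hu with h | h
      · exact absurd h.symm hx
      · have := ih h
        simp [hx] at this ⊢
        omega

-- chains v -> ... covering rest whose final vertex is t (`.attach` carries the
-- membership fact needed for termination)
def ends_at (T : List (Int × Int × Int)) (v : Int) (rest : List Int) (t : Int) : Int :=
  if rest = [] then (if v = t then 1 else 0)
  else
    (((rest.filter (fun u => decide (bget T v u = 1))).attach).map
      (fun u => ends_at T u.1 (rest.filter (fun w => decide (w ≠ u.1))) t)).sum
termination_by rest.length
decreasing_by
  have h := pv_len_filter_ne_lt rest u.1 (List.mem_filter.mp u.2).1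
  have e : (rest.attach.filter (fun x => decide (x.1 ≠ u.1))).length
      = (rest.filter (fun w => decide (w ≠ u.1))).length := by
    rw [← List.countP_eq_length_filter, ← List.countP_eq_length_filter]
    exact List.countP_attach (l := rest) (p := fun w => decide (w ≠ u.1))
  simp only [List.length_unattach]
  exact lt_of_le_of_lt (le_of_eq e) h

-- chains v -> ... covering rest
def starts_from (T : List (Int × Int × Int)) (v : Int) (rest : List Int) : Int :=
  if rest = [] then 1
  else
    (((rest.filter (fun u => decide (bget T v u = 1))).attach).map
      (fun u => starts_from T u.1 (rest.filter (fun w => decide (w ≠ u.1))))).sum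
termination_by rest.length
decreasing_by
  have h := pv_len_filter_ne_lt rest u.1 (List.mem_filter.mp u.2).1
  have e : (rest.attach.filter (fun x => decide (x.1 ≠ u.1))).length
      = (rest.filter (fun w => decide (w ≠ u.1))).length := by
    rw [← List.countP_eq_length_filter, ← List.countP_eq_length_filter]
    exact List.countP_attach (l := rest) (p := fun w => decide (w ≠ u.1))
  simp only [List.length_unattach]
  exact lt_of_le_of_lt (le_of_eq e) h

def check_nonham_alt (T : List (Int × Int × Int)) (n : Int) (a : Int) (b : Int) : Int :=
  let U := (PySem.List.pyRange 0 n 1).filter (fun v => decide (v ≠ a) && decide (v ≠ b))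
  (PySem.List.pyRange 0 (2 ^ U.length) 1).foldl
    (fun total mask =>
      let S := ((PySem.List.pyRange 0 (U.length : Int) 1).filter
          (fun k => decide (PySem.Int.band mask (2 ^ k.toNat) ≠ 0))).map
          (fun k => PySem.List.pyGetD U k 0)
      let R := ((PySem.List.pyRange 0 (U.length : Int) 1).filter
          (fun k => decide (PySem.Int.band mask (2 ^ k.toNat) = 0))).map
          (fun k => PySem.List.pyGetD U k 0)
      let pts := S ++ [a]
      let ea := (pts.map (fun s => ends_at T s (pts.filter (fun w => decide (w ≠ s))) a)).sum
      let bb := starts_from T b R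
      total + (-1) ^ S.length * ea * bb) 0

-- ===== PRECONDITION & SPEC =====
def Spec_check_nonham (T : List (Int × Int × Int)) (n : Int) (a : Int) (b : Int) (out : Int) : Prop := out = check_nonham_alt T n a b
instance (T : List (Int × Int × Int)) (n : Int) (a : Int) (b : Int) (out : Int) : Decidable (Spec_check_nonham T n a b out) := by unfold Spec_check_nonham; infer_instance

-- ===== CLAIM (what is proved, stated in full; the proofs are below) =====
def Claim_equal_check_nonham : Prop := ∀ (T : List (Int × Int × Int)) (n : Int) (a : Int) (b : Int), Dom_check_nonham T n a b → Spec_check_nonham T n a b (check_nonham T n a b)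

-- ===== LEMMAS AND PROOFS =====

-- edge test of B
def pvE (T : List (Int × Int × Int)) (u v : Int) : Bool := decide (bget T u v = 1)

-- consecutive-edge (path) test of a vertex sequence
def pvChain (T : List (Int × Int × Int)) : List Int → Bool
  | [] => true
  | [_] => true
  | x :: y :: r => pvE T x y && pvChain T (y :: r)

-- all ways to pick one element out of a list, with the remaining elements
def pvPick : List Int → List (Int × List Int)
  | [] => []
  | x :: w => (x, w) :: (pvPick w).map (fun z => (z.1, x :: z.2))

theorem pv_aget_eq_bget (T : List (Int × Int × Int)) : aget T = bget T := rfl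

theorem pv_mem_pick (W : List Int) (z : Int × List Int) (hz : z ∈ pvPick W) :
    (z.1 :: z.2).Perm W := by
  induction W generalizing z with
  | nil => cases hz
  | cons x w ih =>
    rcases List.mem_cons.mp hz with rfl | hz'
    · exact List.Perm.refl _
    · rcases List.mem_map.mp hz' with ⟨y, hy, rfl⟩
      exact (List.Perm.swap x y.1 y.2).trans (List.Perm.cons x (ih y hy))

-- the sum over attach in ends_at/starts_from is a plain map-sum
theorem pv_sum_attach_map (l : List Int) (F : Int → Int) :
    (l.attach.map (fun u => F u.1)).sum = (l.map F).sum := by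
  simp only [List.map_subtype, List.unattach_attach]

theorem pv_ends_at_unfold (T : List (Int × Int × Int)) (v : Int) (rest : List Int) (t : Int)
    (h : rest ≠ []) :
    ends_at T v rest t
      = ((rest.filter (fun u => pvE T v u)).map
          (fun u => ends_at T u (rest.filter (fun w => decide (w ≠ u))) t)).sum := by
  rw [ends_at, if_neg h]
  exact pv_sum_attach_map (rest.filter (fun u => pvE T v u))
    (fun u => ends_at T u (rest.filter (fun w => decide (w ≠ u))) t)

theorem pv_starts_from_unfold (T : List (Int × Int × Int)) (v : Int) (rest : List Int)
    (h : rest ≠ []) :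
    starts_from T v rest
      = ((rest.filter (fun u => pvE T v u)).map
          (fun u => starts_from T u (rest.filter (fun w => decide (w ≠ u))))).sum := by
  rw [starts_from, if_neg h]
  exact pv_sum_attach_map (rest.filter (fun u => pvE T v u))
    (fun u => starts_from T u (rest.filter (fun w => decide (w ≠ u))))

theorem pv_ends_at_perm (T : List (Int × Int × Int)) :
    ∀ (m : Nat) (rest rest' : List Int), rest.length = m → rest.Perm rest' →
    ∀ (v t : Int), ends_at T v rest t = ends_at T v rest' t := by
  intro m
  induction m using Nat.strong_induction_on with
  | _ m IH =>
    intro rest rest' hlen hperm v t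
    by_cases h : rest = []
    · subst h
      rw [← hperm.nil_eq]
    · have h' : rest' ≠ [] := by
        intro e; subst e; exact h hperm.symm.nil_eq.symm
      rw [pv_ends_at_unfold T v rest t h, pv_ends_at_unfold T v rest' t h']
      have hfq : (rest.filter (fun u => pvE T v u)).Perm (rest'.filter (fun u => pvE T v u)) :=
        hperm.filter _
      have hstep : ∀ u ∈ rest.filter (fun u => pvE T v u),
          ends_at T u (rest.filter (fun w => decide (w ≠ u))) t
            = ends_at T u (rest'.filter (fun w => decide (w ≠ u))) t := by
        intro u hu
        have humem : u ∈ rest := (List.mem_filter.mp hu).1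
        have hlt : (rest.filter (fun w => decide (w ≠ u))).length < m := by
          rw [← hlen]; exact pv_len_filter_ne_lt rest u humem
        exact IH _ hlt _ _ rfl (hperm.filter _) u t
      calc ((rest.filter (fun u => pvE T v u)).map
              (fun u => ends_at T u (rest.filter (fun w => decide (w ≠ u))) t)).sum
          = ((rest.filter (fun u => pvE T v u)).map
              (fun u => ends_at T u (rest'.filter (fun w => decide (w ≠ u))) t)).sum := by
            rw [List.map_congr_left hstep]
        _ = _ := (hfq.map _).sum_eq

theorem pv_starts_from_perm (T : List (Int × Int × Int)) :
    ∀ (m : Nat) (rest rest' : List Int), rest.length = m → rest.Perm rest' →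
    ∀ (v : Int), starts_from T v rest = starts_from T v rest' := by
  intro m
  induction m using Nat.strong_induction_on with
  | _ m IH =>
    intro rest rest' hlen hperm v
    by_cases h : rest = []
    · subst h
      rw [← hperm.nil_eq]
    · have h' : rest' ≠ [] := by
        intro e; subst e; exact h hperm.symm.nil_eq.symm
      rw [pv_starts_from_unfold T v rest h, pv_starts_from_unfold T v rest' h']
      have hfq : (rest.filter (fun u => pvE T v u)).Perm (rest'.filter (fun u => pvE T v u)) :=
        hperm.filter _
      have hstep : ∀ u ∈ rest.filter (fun u => pvE T v u),
          starts_from T u (rest.filter (fun w => decide (w ≠ u)))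
            = starts_from T u (rest'.filter (fun w => decide (w ≠ u))) := by
        intro u hu
        have humem : u ∈ rest := (List.mem_filter.mp hu).1
        have hlt : (rest.filter (fun w => decide (w ≠ u))).length < m := by
          rw [← hlen]; exact pv_len_filter_ne_lt rest u humem
        exact IH _ hlt _ _ rfl (hperm.filter _) u
      calc ((rest.filter (fun u => pvE T v u)).map
              (fun u => starts_from T u (rest.filter (fun w => decide (w ≠ u))))).sum
          = ((rest.filter (fun u => pvE T v u)).map
              (fun u => starts_from T u (rest'.filter (fun w => decide (w ≠ u))))).sum := by
            rw [List.map_congr_left hstep]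
        _ = _ := (hfq.map _).sum_eq

-- index sum over range = sum over pvPick
theorem pv_idx_sum :
    ∀ (W : List Int) (F : Int → List Int → Int),
    ((List.range W.length).map (fun i =>
        match W[i]? with | none => 0 | some x => F x (W.eraseIdx i))).sum
      = ((pvPick W).map (fun z => F z.1 z.2)).sum := by
  intro W
  induction W with
  | nil => intro F; simp [pvPick]
  | cons x w ih =>
    intro F
    have hlen : (x :: w).length = w.length + 1 := rfl
    rw [hlen, List.range_succ_eq_map]
    simp only [List.map_cons, List.map_map, List.sum_cons, pvPick]
    have h0 : (match (x :: w)[0]? with | none => 0 | some y => F y ((x :: w).eraseIdx 0)) = F x w := rfl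
    rw [h0]
    congr 1
    have hr : List.map ((fun z => F z.1 z.2) ∘ fun z => (z.1, x :: z.2)) (pvPick w)
        = (pvPick w).map (fun z => (fun y r => F y (x :: r)) z.1 z.2) := rfl
    rw [hr, ← ih (fun y r => F y (x :: r))]
    apply congrArg
    apply List.map_congr_left
    intro i _
    simp only [Function.comp_apply, Nat.succ_eq_add_one, List.getElem?_cons_succ,
      List.eraseIdx_cons_succ]

theorem pv_countP_and (c : Bool) (q : List Int → Bool) (l : List (List Int)) :
    l.countP (fun p => c && q p) = if c then l.countP q else 0 := by
  cases c <;> simp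

-- first-element decomposition of a full-permutation count
theorem pv_decomp (V : List Int) (hne : V ≠ []) (pred : List Int → Bool) :
    ((PySem.List.permutations V V.length).countP pred : Int)
      = ((pvPick V).map (fun z =>
          ((PySem.List.permutations z.2 z.2.length).countP (fun p => pred (z.1 :: p)) : Int))).sum := by
  obtain ⟨m, hm⟩ : ∃ m, V.length = m + 1 := by
    cases V with
    | nil => exact absurd rfl hne
    | cons x w => exact ⟨w.length, rfl⟩
  rw [hm, PySem.List.permutations_succ, List.countP_flatMap, Nat.cast_list_sum, List.map_map]
  refine Eq.trans (congrArg List.sum (List.map_congr_left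
    (g := fun i => match V[i]? with
      | none => (0 : Int)
      | some x => ((PySem.List.permutations (V.eraseIdx i) m).countP (fun p => pred (x :: p)) : Int))
    ?_)) ?_
  · intro i _
    cases hV : V[i]? with
    | none => simp [Function.comp, hV]
    | some x => simp only [Function.comp_apply, hV, List.countP_map]; rfl
  · rw [pv_idx_sum V (fun x r => ((PySem.List.permutations r m).countP (fun p => pred (x :: p)) : Int))]
    apply congrArg
    apply List.map_congr_left
    intro z hz
    have hperm := pv_mem_pick _ z hz
    have hzlen : z.2.length = m := by
      have := hperm.length_eq
      simp only [List.length_cons, hm] at this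
      omega
    rw [hzlen]

-- a pick-sum of a permutation-invariant function is an element sum
theorem pv_pick_sum :
    ∀ (W : List Int), W.Nodup → ∀ (F : Int → List Int → Int),
    (∀ u r r', r.Perm r' → F u r = F u r') →
    ((pvPick W).map (fun z => F z.1 z.2)).sum
      = (W.map (fun u => F u (W.filter (fun w => decide (w ≠ u))))).sum := by
  intro W
  induction W with
  | nil => intro _ F _; rfl
  | cons x w ih =>
    intro hnd F hF
    have hxw : x ∉ w := (List.nodup_cons.mp hnd).1
    have hwnd : w.Nodup := (List.nodup_cons.mp hnd).2
    simp only [pvPick, List.map_cons, List.map_map, List.sum_cons]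
    have hr : List.map ((fun z => F z.1 z.2) ∘ fun z => (z.1, x :: z.2)) (pvPick w)
        = (pvPick w).map (fun z => (fun y r => F y (x :: r)) z.1 z.2) := rfl
    rw [hr, ih hwnd (fun y r => F y (x :: r)) (fun u r r' hp => hF u _ _ (hp.cons x))]
    congr 1
    · have hfx : (x :: w).filter (fun ww => decide (ww ≠ x)) = w := by
        rw [List.filter_cons, if_neg (by simp), List.filter_eq_self]
        intro aa ha
        simp only [decide_eq_true_eq]
        exact fun e => hxw (e ▸ ha)
      rw [hfx]
    · refine congrArg List.sum (List.map_congr_left ?_)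
      intro u hu
      have hxu : x ≠ u := fun e => hxw (e ▸ hu)
      have : (x :: w).filter (fun ww => decide (ww ≠ u)) = x :: w.filter (fun ww => decide (ww ≠ u)) := by
        rw [List.filter_cons, if_pos (by simpa using hxu)]
      rw [this]

theorem pv_sum_filter (q : Int → Bool) (F : Int → Int) (l : List Int) :
    ((l.filter q).map F).sum = (l.map (fun u => if q u then F u else 0)).sum := by
  induction l with
  | nil => rfl
  | cons x xs ih =>
    by_cases hx : q x
    · simp [hx, ih]
    · simp [hx, ih]

theorem pv_sum_ite_nodup (F : Int → Int) (l : List Int) (b : Int) (hnd : l.Nodup) (hb : b ∈ l) :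
    (l.map (fun u => if u = b then F u else 0)).sum = F b := by
  induction l with
  | nil => cases hb
  | cons x xs ih =>
    by_cases hxb : x = b
    · subst hxb
      have hx : x ∉ xs := (List.nodup_cons.mp hnd).1
      have hz : (xs.map (fun u => if u = x then F u else 0)).sum = 0 := by
        rw [List.sum_eq_zero]
        intro y hy
        rcases List.mem_map.mp hy with ⟨u, hu, rfl⟩
        have : u ≠ x := fun e => hx (e ▸ hu)
        simp [this]
      simp [hz]
    · have hb' : b ∈ xs := by
        rcases List.mem_cons.mp hb with h | h
        · exact absurd h.symm hxb
        · exact h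
      simp [hxb, ih (List.nodup_cons.mp hnd).2 hb']

-- the indexed validity fold from position 0 computes b && pvChain
theorem pv_chain_aux (T : List (Int × Int × Int)) :
    ∀ (q : List Int) (x : Int) (b : Bool),
    ((List.range q.length).foldl (fun valid k =>
        if aget T ((x :: q).getD k 0) ((x :: q).getD (k + 1) 0) ≠ 1 then false else valid) b)
      = (b && pvChain T (x :: q)) := by
  intro q
  induction q with
  | nil => intro x b; simp [pvChain]
  | cons y r ih =>
    intro x b
    rw [show (y :: r).length = r.length + 1 from rfl, List.range_succ_eq_map, List.foldl_cons,
      List.foldl_map]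
    have hfun : (fun (valid : Bool) (k : Nat) =>
          if aget T ((x :: y :: r).getD (k.succ) 0) ((x :: y :: r).getD (k.succ + 1) 0) ≠ 1
          then false else valid)
        = (fun (valid : Bool) (k : Nat) =>
          if aget T ((y :: r).getD k 0) ((y :: r).getD (k + 1) 0) ≠ 1 then false else valid) := by
      funext valid k
      rw [show k.succ = k + 1 from rfl, List.getD_cons_succ, show k + 1 + 1 = (k + 1) + 1 from rfl,
        List.getD_cons_succ]
    rw [hfun, ih y]
    have hget0 : (x :: y :: r).getD 0 0 = x := rfl
    have hget1 : (x :: y :: r).getD (0 + 1) 0 = y := rfl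
    rw [hget0, hget1]
    have hch : pvChain T (x :: y :: r) = (pvE T x y && pvChain T (y :: r)) := rfl
    rw [hch]
    by_cases he : aget T x y = 1
    · have : pvE T x y = true := by simpa [pvE, ← pv_aget_eq_bget] using he
      simp [he, this]
    · have : pvE T x y = false := by
        simp only [pvE, ← pv_aget_eq_bget]
        simpa using he
      simp [he, this]

-- A's inner validity loop computes pvChain
theorem pv_chain_fold (T : List (Int × Int × Int)) (p : List Int) :
    ((PySem.List.pyRange 0 ((p.length : Int) - 1) 1).foldl
      (fun valid k =>
        if aget T (PySem.List.pyGetD p k 0) (PySem.List.pyGetD p (k + 1) 0) ≠ 1 then false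
        else valid) true) = pvChain T p := by
  cases p with
  | nil => rfl
  | cons x q =>
    have hc : (((x :: q).length : Int) - 1) = ((q.length : Nat) : Int) := by
      simp only [List.length_cons]
      omega
    rw [hc, PySem.List.pyRange_zero_natCast, List.foldl_map]
    have hfun : (fun (valid : Bool) (k : Nat) =>
          if aget T (PySem.List.pyGetD (x :: q) (↑k) 0) (PySem.List.pyGetD (x :: q) (↑k + 1) 0) ≠ 1
          then false else valid)
        = (fun (valid : Bool) (k : Nat) =>
          if aget T ((x :: q).getD k 0) ((x :: q).getD (k + 1) 0) ≠ 1 then false else valid) := by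
      funext valid k
      rw [PySem.List.pyGetD_natCast,
        show ((k : Int) + 1) = (((k + 1 : Nat) : Nat) : Int) by push_cast; ring,
        PySem.List.pyGetD_natCast]
    rw [hfun, pv_chain_aux T q x true, Bool.true_and]

theorem pv_pyGetD_neg_one (p : List Int) :
    PySem.List.pyGetD p (-1) 0 = p.getLast?.getD 0 := by
  cases p with
  | nil => rfl
  | cons x q =>
    have hl : 1 ≤ (x :: q).length := by simp
    simp only [PySem.List.pyGetD, PySem.List.pyGet?, PySem.List.pyIdx?]
    rw [if_neg (by omega), if_pos (by omega)]
    simp only [Option.bind]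
    rw [List.getLast?_eq_getElem?]
    norm_num

theorem pv_pyGetD_zero (p : List Int) :
    PySem.List.pyGetD p 0 0 = p.head?.getD 0 := by
  cases p with
  | nil => rfl
  | cons x q =>
    have hl : 1 ≤ (x :: q).length := by simp
    simp only [PySem.List.pyGetD, PySem.List.pyGet?, PySem.List.pyIdx?]
    rw [if_pos (by omega), if_pos (by omega)]
    simp only [Option.bind]
    rw [List.head?_eq_getElem?]
    norm_num

-- permutation count of chains from v = starts_from
theorem pv_CF (T : List (Int × Int × Int)) :
    ∀ (m : Nat) (W : List Int), W.length = m → W.Nodup → ∀ (v : Int),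
    ((PySem.List.permutations W W.length).countP (fun p => pvChain T (v :: p)) : Int)
      = starts_from T v W := by
  intro m
  induction m using Nat.strong_induction_on with
  | _ m IH =>
    intro W hlen hnd v
    cases W with
    | nil =>
      simp [PySem.List.permutations_zero, pvChain, starts_from]
    | cons x w =>
      have hne : x :: w ≠ [] := by simp
      rw [pv_decomp _ hne, pv_starts_from_unfold T v _ hne]
      have hstep : ∀ z ∈ pvPick (x :: w),
          ((PySem.List.permutations z.2 z.2.length).countP (fun p => pvChain T (v :: z.1 :: p)) : Int)
            = (fun u r => if pvE T v u then starts_from T u r else 0) z.1 z.2 := by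
        intro z hz
        have hperm := pv_mem_pick _ z hz
        have hzlen : z.2.length + 1 = (x :: w).length := by simpa using hperm.length_eq
        have hznd : z.2.Nodup := ((hperm.nodup_iff).mpr hnd).of_cons
        have hpr : (fun p => pvChain T (v :: z.1 :: p))
            = (fun p => pvE T v z.1 && pvChain T (z.1 :: p)) := rfl
        rw [hpr, pv_countP_and]
        by_cases he : pvE T v z.1 = true
        · simp only [he, if_true]
          have hlt : z.2.length < m := by
            have h2 := hzlen
            simp only [List.length_cons] at h2 hlen
            omega
          exact IH z.2.length hlt z.2 rfl hznd z.1
        · simp [he]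
      rw [List.map_congr_left hstep,
        pv_pick_sum _ hnd (fun u r => if pvE T v u then starts_from T u r else 0)
          (by
            intro u r r' hp
            by_cases he : pvE T v u = true
            · simp only [he, if_true]
              exact pv_starts_from_perm T r.length r r' rfl hp u
            · simp [he]),
        pv_sum_filter (fun u => pvE T v u)
          (fun u => starts_from T u ((x :: w).filter (fun w' => decide (w' ≠ u)))) (x :: w)]

-- permutation count of chains from v ending at t = ends_at
theorem pv_CT (T : List (Int × Int × Int)) :
    ∀ (m : Nat) (W : List Int), W.length = m → W.Nodup → ∀ (v t : Int),
    ((PySem.List.permutations W W.length).countP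
        (fun p => ((v :: p).getLast?.getD 0 == t) && pvChain T (v :: p)) : Int)
      = ends_at T v W t := by
  intro m
  induction m using Nat.strong_induction_on with
  | _ m IH =>
    intro W hlen hnd v t
    cases W with
    | nil =>
      by_cases hvt : v = t
      · simp [PySem.List.permutations_zero, pvChain, ends_at, hvt]
      · simp [PySem.List.permutations_zero, pvChain, ends_at, hvt]
    | cons x w =>
      have hne : x :: w ≠ [] := by simp
      rw [pv_decomp _ hne, pv_ends_at_unfold T v _ t hne]
      have hstep : ∀ z ∈ pvPick (x :: w),
          ((PySem.List.permutations z.2 z.2.length).countP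
              (fun p => ((v :: z.1 :: p).getLast?.getD 0 == t) && pvChain T (v :: z.1 :: p)) : Int)
            = (fun u r => if pvE T v u then ends_at T u r t else 0) z.1 z.2 := by
        intro z hz
        have hperm := pv_mem_pick _ z hz
        have hzlen : z.2.length + 1 = (x :: w).length := by simpa using hperm.length_eq
        have hznd : z.2.Nodup := ((hperm.nodup_iff).mpr hnd).of_cons
        have hpr : (fun p => ((v :: z.1 :: p).getLast?.getD 0 == t) && pvChain T (v :: z.1 :: p))
            = (fun p => pvE T v z.1 &&
                (((z.1 :: p).getLast?.getD 0 == t) && pvChain T (z.1 :: p))) := by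
          funext p
          have hc : pvChain T (v :: z.1 :: p) = (pvE T v z.1 && pvChain T (z.1 :: p)) := rfl
          rw [hc, List.getLast?_cons_cons, Bool.and_left_comm]
        rw [hpr, pv_countP_and]
        by_cases he : pvE T v z.1 = true
        · simp only [he, if_true]
          have hlt : z.2.length < m := by
            have h2 := hzlen
            simp only [List.length_cons] at h2 hlen
            omega
          exact IH z.2.length hlt z.2 rfl hznd z.1 t
        · simp [he]
      rw [List.map_congr_left hstep,
        pv_pick_sum _ hnd (fun u r => if pvE T v u then ends_at T u r t else 0)
          (by
            intro u r r' hp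
            by_cases he : pvE T v u = true
            · simp only [he, if_true]
              exact pv_ends_at_perm T r.length r r' rfl hp u t
            · simp [he]),
        pv_sum_filter (fun u => pvE T v u)
          (fun u => ends_at T u ((x :: w).filter (fun w' => decide (w' ≠ u))) t) (x :: w)]

-- a foldl-with-guard counting loop is a countP
theorem pv_foldA (L : List (List Int)) (c : List Int → Prop) [DecidablePred c]
    (val : List Int → Bool) (a0 : Int) :
    L.foldl (fun count p => if c p then count else (if val p then count + 1 else count)) a0
      = a0 + (L.countP (fun p => !(decide (c p)) && val p) : Int) := by
  induction L generalizing a0 with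
  | nil => simp
  | cons p L ih =>
    rw [List.foldl_cons, ih, List.countP_cons]
    by_cases hc : c p
    · simp [hc]
    · by_cases hv : val p = true
      · simp [hc, hv]
        ring
      · simp [hc, hv]

-- sorted(set(S) | {c}) is a rearrangement of S ++ [c]
theorem pv_sorted_union (S : List Int) (c : Int) (hnd : S.Nodup) (hc : c ∉ S) :
    (PySem.List.sorted (PySem.Set.union (PySem.Set.ofList S) [c]) (fun x => x) false).Perm
      (S ++ [c]) := by
  have h1 : PySem.Set.union (PySem.Set.ofList S) [c] = S ++ [c] := by
    rw [PySem.Set.ofList_eq_self_of_nodup S hnd]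
    show List.foldl PySem.Set.add S [c] = S ++ [c]
    simp [PySem.Set.add_of_not_mem, hc]
  rw [h1]
  exact PySem.List.sorted_perm _ _ _

theorem pv_pyRange_nodup (n : Int) : (PySem.List.pyRange 0 n 1).Nodup := by
  by_cases hn : 0 ≤ n
  · obtain ⟨m, rfl⟩ : ∃ m : Nat, n = (m : Int) := ⟨n.toNat, (Int.toNat_of_nonneg hn).symm⟩
    rw [PySem.List.pyRange_zero_natCast]
    refine List.Nodup.map ?_ List.nodup_range
    intro x y hxy
    have hxy2 : (x : Int) = (y : Int) := hxy
    exact_mod_cast hxy2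
  · have he : PySem.List.pyRange 0 n 1 = [] := by
      rw [List.eq_nil_iff_forall_not_mem]
      intro x hx
      have := PySem.List.mem_pyRange_one.mp hx
      omega
    rw [he]
    exact List.nodup_nil

-- the comprehension [U[k] for k in range(len(U)) if <test k>] is duplicate-free and drawn from U
theorem pv_sel_facts (U : List Int) (hU : U.Nodup) (qm : Int → Bool) :
    (((PySem.List.pyRange 0 (U.length : Int) 1).filter qm).map
        (fun k => PySem.List.pyGetD U k 0)).Nodup
    ∧ ∀ x ∈ ((PySem.List.pyRange 0 (U.length : Int) 1).filter qm).map
        (fun k => PySem.List.pyGetD U k 0), x ∈ U := by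
  rw [PySem.List.pyRange_zero_natCast, List.filter_map, List.map_map]
  have hpt : ∀ i ∈ (List.range U.length).filter (qm ∘ fun k : Nat => (k : Int)),
      ((fun k => PySem.List.pyGetD U k 0) ∘ fun k : Nat => (k : Int)) i = U.getD i 0 := by
    intro i _
    exact PySem.List.pyGetD_natCast U i 0
  rw [List.map_congr_left hpt]
  have hmemrange : ∀ i ∈ (List.range U.length).filter (qm ∘ fun k : Nat => (k : Int)),
      i < U.length := by
    intro i hi
    exact List.mem_range.mp (List.mem_filter.mp hi).1
  constructor
  · apply List.Nodup.map_on
    · intro i hi j hj hij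
      have hi' := hmemrange i hi
      have hj' := hmemrange j hj
      rw [List.getD_eq_getElem U 0 hi', List.getD_eq_getElem U 0 hj'] at hij
      exact (hU.getElem_inj_iff).mp hij
    · exact List.nodup_range.filter _
  · intro x hx
    rcases List.mem_map.mp hx with ⟨i, hi, rfl⟩
    have hi' := hmemrange i hi
    rw [List.getD_eq_getElem U 0 hi']
    exact List.getElem_mem hi'

-- E_paths over a list V that is a duplicate-free rearrangement of S ++ [a]
theorem pv_KEY1 (T : List (Int × Int × Int)) (S V : List Int) (a : Int)
    (hnd : S.Nodup) (ha : a ∉ S) (hperm : V.Perm (S ++ [a])) :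
    E_paths T V a
      = ((S ++ [a]).map (fun s =>
          ends_at T s ((S ++ [a]).filter (fun w => decide (w ≠ s))) a)).sum := by
  have hSa : (S ++ [a]).Nodup := by
    rw [List.nodup_append]
    refine ⟨hnd, List.nodup_singleton a, ?_⟩
    intro x hx y hyy
    have hya : y = a := List.mem_singleton.mp hyy
    intro e
    exact ha (hya ▸ e ▸ hx)
  have hndV : V.Nodup := (hperm.nodup_iff).mpr hSa
  have hlenV : V.length = S.length + 1 := by simpa using hperm.length_eq
  by_cases hS : S = []
  · subst hS
    have hV : V = [a] := List.perm_singleton.mp hperm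
    subst hV
    rw [E_paths, if_pos (show ([a] : List Int).length = 1 from rfl),
      if_pos (show PySem.List.pyGetD [a] 0 0 = a by
        rw [pv_pyGetD_zero [a]]
        rfl)]
    have h1 : ([a] : List Int).filter (fun w => decide (w ≠ a)) = [] := by simp
    simp only [List.nil_append, List.map_cons, List.map_nil, h1, List.sum_cons, List.sum_nil]
    rw [ends_at]
    simp
  · have hV1 : V.length ≠ 1 := by
      have : S.length ≠ 0 := fun e => hS (List.length_eq_zero_iff.mp e)
      omega
    rw [E_paths, if_neg hV1]
    refine Eq.trans (pv_foldA (PySem.List.permutations V V.length)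
      (fun p => PySem.List.pyGetD p (-1) 0 ≠ a)
      (fun p => (PySem.List.pyRange 0 ((p.length : Int) - 1) 1).foldl
        (fun valid k =>
          if aget T (PySem.List.pyGetD p k 0) (PySem.List.pyGetD p (k + 1) 0) ≠ 1 then false
          else valid) true) 0) ?_
    rw [zero_add]
    have hcg : (PySem.List.permutations V V.length).countP
        (fun p => !(decide (PySem.List.pyGetD p (-1) 0 ≠ a)) &&
          (PySem.List.pyRange 0 ((p.length : Int) - 1) 1).foldl
            (fun valid k =>
              if aget T (PySem.List.pyGetD p k 0) (PySem.List.pyGetD p (k + 1) 0) ≠ 1 then false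
              else valid) true)
        = (PySem.List.permutations V V.length).countP
            (fun p => (p.getLast?.getD 0 == a) && pvChain T p) := by
      apply List.countP_congr
      intro p _
      rw [pv_chain_fold T p, pv_pyGetD_neg_one p]
      by_cases h1 : p.getLast?.getD 0 = a <;> simp [h1]
    rw [hcg, pv_decomp V (by
      intro e
      rw [e] at hlenV
      simp at hlenV)]
    have hstep : ∀ z ∈ pvPick V,
        ((PySem.List.permutations z.2 z.2.length).countP
            (fun p => (((z.1 :: p).getLast?.getD 0 == a) && pvChain T (z.1 :: p))) : Int)
          = (fun u r => ends_at T u r a) z.1 z.2 := by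
      intro z hz
      have hperm' := pv_mem_pick _ z hz
      have hznd : z.2.Nodup := ((hperm'.nodup_iff).mpr hndV).of_cons
      exact pv_CT T z.2.length z.2 rfl hznd z.1 a
    rw [List.map_congr_left hstep,
      pv_pick_sum _ hndV (fun u r => ends_at T u r a)
        (fun u r r' hp => pv_ends_at_perm T r.length r r' rfl hp u a)]
    have htrans : ∀ u ∈ V,
        ends_at T u (V.filter (fun w => decide (w ≠ u))) a
          = ends_at T u ((S ++ [a]).filter (fun w => decide (w ≠ u))) a := by
      intro u _
      exact pv_ends_at_perm T _ _ _ rfl (hperm.filter _) u a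
    rw [List.map_congr_left htrans]
    exact (hperm.map _).sum_eq

-- B_paths over a list V that is a duplicate-free rearrangement of R ++ [b]
theorem pv_KEY2 (T : List (Int × Int × Int)) (R V : List Int) (b : Int)
    (hnd : R.Nodup) (hb : b ∉ R) (hperm : V.Perm (R ++ [b])) :
    B_paths T V b = starts_from T b R := by
  have hRb : (R ++ [b]).Nodup := by
    rw [List.nodup_append]
    refine ⟨hnd, List.nodup_singleton b, ?_⟩
    intro x hx y hyy
    have hya : y = b := List.mem_singleton.mp hyy
    intro e
    exact hb (hya ▸ e ▸ hx)
  have hndV : V.Nodup := (hperm.nodup_iff).mpr hRb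
  have hlenV : V.length = R.length + 1 := by simpa using hperm.length_eq
  have hbV : b ∈ V := hperm.mem_iff.mpr (by simp)
  have hfR : (R ++ [b]).filter (fun w => decide (w ≠ b)) = R := by
    rw [List.filter_append]
    have h2 : [b].filter (fun w => decide (w ≠ b)) = [] := by simp
    rw [h2, List.append_nil, List.filter_eq_self]
    intro x hx
    simp only [decide_eq_true_eq]
    exact fun e => hb (e ▸ hx)
  by_cases hR : R = []
  · subst hR
    have hV : V = [b] := List.perm_singleton.mp hperm
    subst hV
    rw [B_paths, if_pos (show ([b] : List Int).length = 1 from rfl),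
      if_pos (show PySem.List.pyGetD [b] 0 0 = b by
        rw [pv_pyGetD_zero [b]]
        rfl)]
    rw [starts_from]
    simp
  · have hV1 : V.length ≠ 1 := by
      have : R.length ≠ 0 := fun e => hR (List.length_eq_zero_iff.mp e)
      omega
    rw [B_paths, if_neg hV1]
    refine Eq.trans (pv_foldA (PySem.List.permutations V V.length)
      (fun p => PySem.List.pyGetD p 0 0 ≠ b)
      (fun p => (PySem.List.pyRange 0 ((p.length : Int) - 1) 1).foldl
        (fun valid k =>
          if aget T (PySem.List.pyGetD p k 0) (PySem.List.pyGetD p (k + 1) 0) ≠ 1 then false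
          else valid) true) 0) ?_
    rw [zero_add]
    have hcg : (PySem.List.permutations V V.length).countP
        (fun p => !(decide (PySem.List.pyGetD p 0 0 ≠ b)) &&
          (PySem.List.pyRange 0 ((p.length : Int) - 1) 1).foldl
            (fun valid k =>
              if aget T (PySem.List.pyGetD p k 0) (PySem.List.pyGetD p (k + 1) 0) ≠ 1 then false
              else valid) true)
        = (PySem.List.permutations V V.length).countP
            (fun p => (p.head?.getD 0 == b) && pvChain T p) := by
      apply List.countP_congr
      intro p _
      rw [pv_chain_fold T p, pv_pyGetD_zero p]
      by_cases h1 : p.head?.getD 0 = b <;> simp [h1]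
    rw [hcg, pv_decomp V (by
      intro e
      rw [e] at hlenV
      simp at hlenV)]
    have hstep : ∀ z ∈ pvPick V,
        ((PySem.List.permutations z.2 z.2.length).countP
            (fun p => (((z.1 :: p).head?.getD 0 == b) && pvChain T (z.1 :: p))) : Int)
          = (fun u r => if u = b then starts_from T u r else 0) z.1 z.2 := by
      intro z hz
      have hperm' := pv_mem_pick _ z hz
      have hznd : z.2.Nodup := ((hperm'.nodup_iff).mpr hndV).of_cons
      have hpr : (fun p => (((z.1 :: p).head?.getD 0 == b) && pvChain T (z.1 :: p)))
          = (fun p => (z.1 == b) && pvChain T (z.1 :: p)) := rfl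
      rw [hpr, pv_countP_and]
      show _ = if z.1 = b then starts_from T z.1 z.2 else 0
      by_cases he : z.1 = b
      · rw [if_pos (by simpa using he), if_pos he]
        exact pv_CF T z.2.length z.2 rfl hznd z.1
      · rw [if_neg (by simpa using he), if_neg he]
        rfl
    rw [List.map_congr_left hstep,
      pv_pick_sum _ hndV (fun u r => if u = b then starts_from T u r else 0)
        (by
          intro u r r' hp
          show (if u = b then starts_from T u r else 0) = (if u = b then starts_from T u r' else 0)
          by_cases he : u = b
          · rw [if_pos he, if_pos he]
            exact pv_starts_from_perm T r.length r r' rfl hp u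
          · rw [if_neg he, if_neg he]),
      pv_sum_ite_nodup (fun u => starts_from T u (V.filter (fun w => decide (w ≠ u)))) V b hndV hbV]
    have hpf : (V.filter (fun w => decide (w ≠ b))).Perm R := by
      have := hperm.filter (fun w => decide (w ≠ b))
      rw [hfR] at this
      exact this
    exact pv_starts_from_perm T _ _ _ rfl hpf b

-- ===== VERDICT (by name: the statement is the Claim_ definition above) =====
theorem check_nonham_spec : Claim_equal_check_nonham := by
  intro T n a b _
  show check_nonham T n a b = check_nonham_alt T n a b
  simp only [check_nonham, check_nonham_alt]
  set U := (PySem.List.pyRange 0 n 1).filter (fun v => decide (v ≠ a) && decide (v ≠ b)) with hUdef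
  have hUnd : U.Nodup := (pv_pyRange_nodup n).filter _
  have haU : a ∉ U := by
    intro hmem
    have := (List.mem_filter.mp hmem).2
    simp at this
  have hbU : b ∉ U := by
    intro hmem
    have := (List.mem_filter.mp hmem).2
    simp at this
  apply PySem.List.foldl_congr_mem
  intro total mask _
  have hS := pv_sel_facts U hUnd (fun k => decide (PySem.Int.band mask (2 ^ k.toNat) ≠ 0))
  have hR := pv_sel_facts U hUnd (fun k => decide (PySem.Int.band mask (2 ^ k.toNat) = 0))
  have haS : a ∉ ((PySem.List.pyRange 0 (U.length : Int) 1).filter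
      (fun k => decide (PySem.Int.band mask (2 ^ k.toNat) ≠ 0))).map
      (fun k => PySem.List.pyGetD U k 0) :=
    fun hmem => haU (hS.2 a hmem)
  have hbR : b ∉ ((PySem.List.pyRange 0 (U.length : Int) 1).filter
      (fun k => decide (PySem.Int.band mask (2 ^ k.toNat) = 0))).map
      (fun k => PySem.List.pyGetD U k 0) :=
    fun hmem => hbU (hR.2 b hmem)
  rw [pv_KEY1 T _ _ a hS.1 haS (pv_sorted_union _ a hS.1 haS),
    pv_KEY2 T _ _ b hR.1 hbR (pv_sorted_union _ b hR.1 hbR)]
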